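-- pv_equiv track=rewrite | github.com/ViktorKurach/System-Programming | Labwork 4/hungarian.py | mark_any_zero
-- ===== SOURCE A (Python) =====
-- def cross_zeros_in_column(matrix, j, i_of_zero):
--     for i in range(0, len(matrix)):
--         if matrix[i][j] == "0" and i != i_of_zero:
--             matrix[i][j] = "x"
--     return matrix
--
-- def cross_zeros_in_row(matrix, i, j_of_zero):
--     for j in range(0, len(matrix[0])):
--         if matrix[i][j] == "0" and j != j_of_zero:
--             matrix[i][j] = "x"
--     return matrix
--
-- def mark_any_zero(matrix):
--     for i in range(0, len(matrix)):
--         for j in range(0, len(matrix[0])):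
--             if matrix[i][j] == "0":
--                 matrix[i][j] = "[0]"
--                 matrix = cross_zeros_in_column(matrix, j, i)
--                 matrix = cross_zeros_in_row(matrix, i, j)
--     return matrix
-- ===== SOURCE B (Python) =====
-- def mark_any_zero(matrix):
--     # Two-pass rewrite: pass 1 greedily picks, per row, the first "0" in a
--     # still-unused column; pass 2 relabels every cell once.  Mutates the rows
--     # in place and returns the same matrix object, like the original.
--     if not matrix:
--         return matrix
--     w = len(matrix[0])
--     marks = []
--     used_rows = []
--     used_cols = []
--     for i in range(len(matrix)):
--         row = matrix[i]
--         for j in range(w):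
--             if row[j] == "0" and j not in used_cols:
--                 marks.append((i, j))
--                 used_rows.append(i)
--                 used_cols.append(j)
--                 break
--     for i in range(len(matrix)):
--         row = matrix[i]
--         for j in range(w):
--             if (i, j) in marks:
--                 row[j] = "[0]"
--             elif row[j] == "0" and (i in used_rows or j in used_cols):
--                 row[j] = "x"
--     return matrix
-- ===== Notes on version B (the rewrite author's own statement) =====
-- stated objective: alternative
-- what changed: A marks a zero and immediately crosses out its whole row and column in-place, repeatedly rescanning the mutated matrix; B first computes the marked positions and used rows/columns in one greedy pass over the original values and then relabels every cell exactly once in a second pass.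
import Mathlib
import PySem

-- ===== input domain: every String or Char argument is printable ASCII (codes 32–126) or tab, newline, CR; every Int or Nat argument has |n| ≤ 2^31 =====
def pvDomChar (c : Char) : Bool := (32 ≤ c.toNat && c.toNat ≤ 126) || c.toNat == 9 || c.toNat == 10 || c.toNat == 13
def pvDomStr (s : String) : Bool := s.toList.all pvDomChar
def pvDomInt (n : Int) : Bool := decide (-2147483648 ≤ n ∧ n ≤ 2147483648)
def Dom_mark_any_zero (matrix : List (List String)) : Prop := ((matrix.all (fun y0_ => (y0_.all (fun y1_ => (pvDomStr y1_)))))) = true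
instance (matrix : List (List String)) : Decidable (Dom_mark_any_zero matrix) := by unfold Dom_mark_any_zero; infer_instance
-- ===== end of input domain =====

-- B replaces A's mark-then-cross-out in-place sweeps by a two-pass scheme (pass 1 collects the
-- marked positions/used rows/used columns, pass 2 relabels every cell once); equivalence is about
-- the RETURN value only (both Pythons mutate the argument rows in place and return the same object).

-- ===== PORT A =====
-- matrix[i][j] read (default "" out of range; inside Pre_ every access A makes is in range)
def pvGetA (m : List (List String)) (i j : Nat) : String := (m.getD i []).getD j ""
-- matrix[i][j] = v (identity out of range; in range inside Pre_)
def pvSetA (m : List (List String)) (i j : Nat) (v : String) : List (List String) :=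
  m.set i ((m.getD i []).set j v)

def cross_zeros_in_column (m : List (List String)) (j iz : Nat) : List (List String) :=
  (List.range m.length).foldl
    (fun acc i => if pvGetA acc i j = "0" ∧ i ≠ iz then pvSetA acc i j "x" else acc) m

def cross_zeros_in_row (m : List (List String)) (i jz : Nat) : List (List String) :=
  (List.range (m.headD []).length).foldl
    (fun acc j => if pvGetA acc i j = "0" ∧ j ≠ jz then pvSetA acc i j "x" else acc) m

def mark_any_zero (matrix : List (List String)) : List (List String) :=
  (List.range matrix.length).foldl
    (fun m i =>
      (List.range (m.headD []).length).foldl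
        (fun m2 j =>
          if pvGetA m2 i j = "0" then
            cross_zeros_in_row (cross_zeros_in_column (pvSetA m2 i j "[0]") j i) i j
          else m2) m)
    matrix

-- ===== PORT B =====
-- pass 1, inner loop with break: first j < w with row[j] == "0" and j not in used_cols
def pvFindMark (row : List String) (w : Nat) (cols : List Nat) : Option Nat :=
  (List.range w).find? (fun j => row.getD j "" == "0" && !(cols.contains j))

-- one row of pass 1: update (marks, used_rows, used_cols)
def pvPass1Step (st : List (Nat × Nat) × List Nat × List Nat) (i : Nat) (row : List String)
    (w : Nat) : List (Nat × Nat) × List Nat × List Nat :=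
  match pvFindMark row w st.2.2 with
  | some j => (st.1 ++ [(i, j)], st.2.1 ++ [i], st.2.2 ++ [j])
  | none => st

def pvPass1 (m : List (List String)) (w : Nat) : List (Nat × Nat) × List Nat × List Nat :=
  (List.range m.length).foldl (fun st i => pvPass1Step st i (m.getD i []) w) ([], [], [])

-- pass 2 on one row: relabel cells 0..w-1 in place
def pvRelabelRow (i : Nat) (row : List String) (w : Nat)
    (st : List (Nat × Nat) × List Nat × List Nat) : List String :=
  (List.range w).foldl
    (fun r j =>
      if st.1.contains (i, j) then r.set j "[0]"
      else if r.getD j "" == "0" && (st.2.1.contains i || st.2.2.contains j) then r.set j "x"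
      else r) row

def mark_any_zero_alt (matrix : List (List String)) : List (List String) :=
  match matrix with
  | [] => matrix
  | _ :: _ =>
      let w := (matrix.headD []).length
      let st := pvPass1 matrix w
      matrix.mapIdx (fun i row => pvRelabelRow i row w st)

-- ===== PRECONDITION & SPEC =====
-- Pre_ excludes exactly the matrices on which the Python A raises IndexError: those with a row
-- shorter than row 0 (A indexes every row at columns 0..len(matrix[0])-1).
def Pre_mark_any_zero (matrix : List (List String)) : Prop :=
  ∀ row ∈ matrix, (matrix.headD []).length ≤ row.length
instance (matrix : List (List String)) : Decidable (Pre_mark_any_zero matrix) := by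
  unfold Pre_mark_any_zero; infer_instance
def pvWitness_mark_any_zero : List (List String) := [["0", "1", "0"], ["1", "0", "0"]]
def Spec_mark_any_zero (matrix : List (List String)) (out : List (List String)) : Prop := out = mark_any_zero_alt matrix
instance (matrix : List (List String)) (out : List (List String)) : Decidable (Spec_mark_any_zero matrix out) := by unfold Spec_mark_any_zero; infer_instance

-- ===== CLAIM (what is proved, stated in full; the proofs are below) =====
def Claim_equal_mark_any_zero : Prop := ∀ (matrix : List (List String)), Dom_mark_any_zero matrix → Pre_mark_any_zero matrix → Spec_mark_any_zero matrix (mark_any_zero matrix)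

-- ===== LEMMAS AND PROOFS =====

-- shape of a matrix: the list of row lengths
def pvShp (m : List (List String)) : List Nat := m.map List.length
def pvRowlen (m : List (List String)) (i : Nat) : Nat := (m.getD i []).length

-- the final label of cell (i,j) with original value v, given a pass-1 state
def pvCell (st : List (Nat × Nat) × List Nat × List Nat) (w i j : Nat) (v : String) : String :=
  if (i, j) ∈ st.1 then "[0]"
  else if v = "0" ∧ j < w ∧ (i ∈ st.2.1 ∨ j ∈ st.2.2) then "x"
  else v

-- pass-1 state after the first k rows
def pvSig (m : List (List String)) (w : Nat) : Nat → List (Nat × Nat) × List Nat × List Nat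
  | 0 => ([], [], [])
  | k + 1 => pvPass1Step (pvSig m w k) k (m.getD k []) w

lemma pvHeadD_eq_getD (m : List (List String)) : m.headD [] = m.getD 0 [] := by
  cases m <;> rfl

lemma pvRowlen_shp (m : List (List String)) (i : Nat) :
    pvRowlen m i = (pvShp m).getD i 0 := by
  unfold pvRowlen pvShp
  rcases Nat.lt_or_ge i m.length with hi | hi
  · rw [List.getD_eq_getElem m [] hi, List.getD_eq_getElem _ 0 (by simpa using hi)]
    simp
  · rw [List.getD_eq_getElem?_getD, List.getD_eq_getElem?_getD,
      List.getElem?_eq_none hi, List.getElem?_eq_none (by simpa using hi)]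
    rfl

lemma pvGetA_default {m : List (List String)} {i j : Nat}
    (h : ¬ (i < m.length ∧ j < pvRowlen m i)) : pvGetA m i j = "" := by
  unfold pvGetA
  rcases Nat.lt_or_ge i m.length with hi | hi
  · push Not at h
    have hj := h hi
    unfold pvRowlen at hj
    rw [List.getD_eq_getElem m [] hi] at hj ⊢
    rw [List.getD_eq_getElem?_getD, List.getElem?_eq_none (by omega)]
    rfl
  · rw [List.getD_eq_getElem?_getD (l := m), List.getElem?_eq_none hi]
    rfl

lemma pvGetA_inrange {m : List (List String)} {i j : Nat}
    (h : pvGetA m i j = "0") : i < m.length ∧ j < pvRowlen m i := by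
  by_contra hc
  rw [pvGetA_default hc] at h
  exact absurd h (by decide)

lemma pvShp_setA (m : List (List String)) (i j : Nat) (v : String) :
    pvShp (pvSetA m i j v) = pvShp m := by
  unfold pvShp pvSetA
  rcases Nat.lt_or_ge i m.length with hi | hi
  · rw [List.map_set]
    have : ((m.getD i []).set j v).length = (List.map List.length m)[i]'(by simpa using hi) := by
      simp [List.getD_eq_getElem?_getD, List.getElem?_eq_getElem hi]
    rw [this, List.set_getElem_self]
  · rw [List.set_eq_of_length_le (by simpa using hi)]

lemma pvLen_of_shp {m m' : List (List String)} (h : pvShp m = pvShp m') :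
    m.length = m'.length := by
  have := congrArg List.length h
  simpa [pvShp] using this

lemma pvRowlen_of_shp {m m' : List (List String)} (h : pvShp m = pvShp m') (i : Nat) :
    pvRowlen m i = pvRowlen m' i := by
  rw [pvRowlen_shp, pvRowlen_shp, h]

lemma pvGetA_setA (m : List (List String)) (i j : Nat) (v : String) (i' j' : Nat) :
    pvGetA (pvSetA m i j v) i' j' =
      if i = i' ∧ j = j' ∧ i < m.length ∧ j < pvRowlen m i then v else pvGetA m i' j' := by
  unfold pvGetA pvSetA pvRowlen
  by_cases hi : i = i'
  · subst hi
    by_cases hlen : i < m.length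
    · have hrow : (m.set i ((m.getD i []).set j v)).getD i [] = (m.getD i []).set j v := by
        simp [List.getD_eq_getElem?_getD, List.getElem?_set, hlen]
      rw [hrow]
      by_cases hj : j = j'
      · subst hj
        by_cases hjl : j < (m.getD i []).length
        · have hjl' : j < m[i].length := by
            simpa [List.getD_eq_getElem?_getD, List.getElem?_eq_getElem hlen] using hjl
          simp [List.getD_eq_getElem?_getD, List.getElem?_set, hjl, hjl', hlen,
            List.getElem?_eq_getElem hlen]
        · have hjl' : ¬ j < m[i].length := by
            intro hc
            exact hjl (by simpa [List.getD_eq_getElem?_getD, List.getElem?_eq_getElem hlen] using hc)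
          rw [List.set_eq_of_length_le (by omega)]
          simp [hlen, hjl, hjl']
      · simp [List.getD_eq_getElem?_getD, List.getElem?_set, hj]
    · rw [List.set_eq_of_length_le (by omega)]
      simp [hlen]
  · have hrow : (m.set i ((m.getD i []).set j v)).getD i' [] = m.getD i' [] := by
      simp [List.getD_eq_getElem?_getD, List.getElem?_set, hi]
    simp [hrow, hi]

lemma pvFoldl_fix {α β : Type} {f : α → β → α} {s : α} {l : List β}
    (h : ∀ x ∈ l, f s x = s) : l.foldl f s = s := by
  induction l with
  | nil => rfl
  | cons x xs ih =>
      simp only [List.foldl_cons, h x (by simp)]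
      exact ih (fun y hy => h y (by simp [hy]))

lemma pvShp_foldl {β : Type} {f : List (List String) → β → List (List String)} {l : List β}
    {s : List (List String)} (h : ∀ s' x, pvShp (f s' x) = pvShp s') :
    pvShp (l.foldl f s) = pvShp s := by
  induction l generalizing s with
  | nil => rfl
  | cons x xs ih => simp only [List.foldl_cons]; rw [ih, h]

lemma pvShp_crossCol (m : List (List String)) (j iz : Nat) :
    pvShp (cross_zeros_in_column m j iz) = pvShp m := by
  unfold cross_zeros_in_column
  exact pvShp_foldl (fun s' i => by split <;> simp [pvShp_setA])

lemma pvShp_crossRow (m : List (List String)) (i jz : Nat) :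
    pvShp (cross_zeros_in_row m i jz) = pvShp m := by
  unfold cross_zeros_in_row
  exact pvShp_foldl (fun s' j => by split <;> simp [pvShp_setA])

-- pointwise behaviour of a cross_zeros_in_column-style fold over an arbitrary range
lemma pvCrossColAux (j0 iz : Nat) (M : List (List String)) (t : Nat) : ∀ i j,
    pvGetA ((List.range t).foldl
        (fun acc i' => if pvGetA acc i' j0 = "0" ∧ i' ≠ iz then pvSetA acc i' j0 "x" else acc) M) i j =
      if i < t ∧ j = j0 ∧ i ≠ iz ∧ pvGetA M i j0 = "0" then "x" else pvGetA M i j := by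
  induction t with
  | zero => simp
  | succ t ih =>
      intro i j
      rw [List.range_succ, List.foldl_append]
      set Mt := (List.range t).foldl
        (fun acc i' => if pvGetA acc i' j0 = "0" ∧ i' ≠ iz then pvSetA acc i' j0 "x" else acc) M with hMt
      have hshp : pvShp Mt = pvShp M := by
        rw [hMt]; exact pvShp_foldl (fun s' i' => by split <;> simp [pvShp_setA])
      have htj : pvGetA Mt t j0 = pvGetA M t j0 := by rw [ih]; simp
      simp only [List.foldl_cons, List.foldl_nil]
      by_cases hfire : pvGetA M t j0 = "0" ∧ t ≠ iz
      · rw [if_pos (by rw [htj]; exact hfire)]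
        have hin := pvGetA_inrange hfire.1
        rw [pvGetA_setA]
        rw [pvLen_of_shp hshp, pvRowlen_of_shp hshp]
        by_cases hit : t = i
        · subst hit
          by_cases hjj : j0 = j
          · subst hjj
            rw [if_pos ⟨rfl, rfl, hin⟩, if_pos ⟨Nat.lt_succ_self _, rfl, hfire.2, hfire.1⟩]
          · rw [if_neg (by tauto), ih]
            have : ¬ (t < t ∧ j = j0 ∧ t ≠ iz ∧ pvGetA M t j0 = "0") := by omega
            rw [if_neg this, if_neg (by tauto)]
        · rw [if_neg (by tauto), ih]
          by_cases hc : i < t ∧ j = j0 ∧ i ≠ iz ∧ pvGetA M i j0 = "0"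
          · rw [if_pos hc, if_pos ⟨by omega, hc.2⟩]
          · rw [if_neg hc, if_neg (by
              rintro ⟨h1, h2, h3, h4⟩
              exact hc ⟨by omega, h2, h3, h4⟩)]
      · rw [if_neg (by rw [htj]; exact hfire), ih]
        by_cases hc : i < t ∧ j = j0 ∧ i ≠ iz ∧ pvGetA M i j0 = "0"
        · rw [if_pos hc, if_pos ⟨by omega, hc.2⟩]
        · rw [if_neg hc, if_neg (by
            rintro ⟨h1, h2, h3, h4⟩
            rcases Nat.lt_or_ge i t with h | h
            · exact hc ⟨h, h2, h3, h4⟩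
            · have : i = t := by omega
              subst this; exact hfire ⟨h4, h3⟩)]

lemma pvGetA_crossCol (M : List (List String)) (j0 iz i j : Nat) :
    pvGetA (cross_zeros_in_column M j0 iz) i j =
      if j = j0 ∧ i ≠ iz ∧ pvGetA M i j0 = "0" then "x" else pvGetA M i j := by
  unfold cross_zeros_in_column
  rw [pvCrossColAux]
  by_cases hc : j = j0 ∧ i ≠ iz ∧ pvGetA M i j0 = "0"
  · rw [if_pos ⟨(pvGetA_inrange hc.2.2).1, hc⟩, if_pos hc]
  · rw [if_neg (by tauto), if_neg hc]

-- pointwise behaviour of a cross_zeros_in_row-style fold over an arbitrary range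
lemma pvCrossRowAux (iz jz : Nat) (M : List (List String)) (t : Nat) : ∀ i j,
    pvGetA ((List.range t).foldl
        (fun acc j' => if pvGetA acc iz j' = "0" ∧ j' ≠ jz then pvSetA acc iz j' "x" else acc) M) i j =
      if i = iz ∧ j < t ∧ j ≠ jz ∧ pvGetA M iz j = "0" then "x" else pvGetA M i j := by
  induction t with
  | zero => simp
  | succ t ih =>
      intro i j
      rw [List.range_succ, List.foldl_append]
      set Mt := (List.range t).foldl
        (fun acc j' => if pvGetA acc iz j' = "0" ∧ j' ≠ jz then pvSetA acc iz j' "x" else acc) M with hMt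
      have hshp : pvShp Mt = pvShp M := by
        rw [hMt]; exact pvShp_foldl (fun s' j' => by split <;> simp [pvShp_setA])
      have htj : pvGetA Mt iz t = pvGetA M iz t := by rw [ih]; simp
      simp only [List.foldl_cons, List.foldl_nil]
      by_cases hfire : pvGetA M iz t = "0" ∧ t ≠ jz
      · rw [if_pos (by rw [htj]; exact hfire)]
        have hin := pvGetA_inrange hfire.1
        rw [pvGetA_setA]
        rw [pvLen_of_shp hshp, pvRowlen_of_shp hshp]
        by_cases hii : iz = i
        · subst hii
          by_cases hjj : t = j
          · subst hjj
            rw [if_pos ⟨rfl, rfl, hin⟩, if_pos ⟨rfl, Nat.lt_succ_self _, hfire.2, hfire.1⟩]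
          · rw [if_neg (by tauto), ih]
            by_cases hc : j < t ∧ j ≠ jz ∧ pvGetA M iz j = "0"
            · rw [if_pos ⟨rfl, hc⟩, if_pos ⟨rfl, by omega, hc.2⟩]
            · rw [if_neg (by tauto), if_neg (by
                rintro ⟨h1, h2, h3, h4⟩
                exact hc ⟨by omega, h3, h4⟩)]
        · rw [if_neg (by tauto), ih]
          rw [if_neg (by tauto), if_neg (by tauto)]
      · rw [if_neg (by rw [htj]; exact hfire), ih]
        by_cases hc : i = iz ∧ j < t ∧ j ≠ jz ∧ pvGetA M iz j = "0"
        · rw [if_pos hc, if_pos ⟨hc.1, by omega, hc.2.2⟩]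
        · rw [if_neg hc, if_neg (by
            rintro ⟨h1, h2, h3, h4⟩
            rcases Nat.lt_or_ge j t with h | h
            · exact hc ⟨h1, h, h3, h4⟩
            · have : j = t := by omega
              subst this; exact hfire ⟨h4, h3⟩)]

lemma pvGetA_crossRow (M : List (List String)) (iz jz i j : Nat) :
    pvGetA (cross_zeros_in_row M iz jz) i j =
      if i = iz ∧ j < (M.headD []).length ∧ j ≠ jz ∧ pvGetA M iz j = "0" then "x"
      else pvGetA M i j := by
  unfold cross_zeros_in_row
  rw [pvCrossRowAux]

-- Boolean test of pass 1 read as a proposition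
lemma pvFindP (m : List (List String)) (k j : Nat) (cs : List Nat) :
    (((m.getD k []).getD j "" == "0") && !(cs.contains j)) = true ↔
      (pvGetA m k j = "0" ∧ j ∉ cs) := by
  simp [pvGetA]

-- value of the current matrix on the not-yet-processed row k
lemma pvCellRowK (st : List (Nat × Nat) × List Nat × List Nat) (w k j : Nat) (v : String)
    (hknotm : ∀ j', (k, j') ∉ st.1) (hknotr : k ∉ st.2.1) (hj : j < w) :
    pvCell st w k j v = if v = "0" ∧ j ∈ st.2.2 then "x" else v := by
  unfold pvCell
  rw [if_neg (hknotm j)]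
  by_cases hv : v = "0"
  · by_cases hcs : j ∈ st.2.2
    · rw [if_pos ⟨hv, hj, Or.inr hcs⟩, if_pos ⟨hv, hcs⟩]
    · rw [if_neg (by tauto), if_neg (by tauto)]
  · rw [if_neg (by tauto), if_neg (by tauto)]

-- one outer-loop step of A, matched against one pvPass1Step of B
lemma pvStep (m : List (List String)) (hpre : Pre_mark_any_zero m)
    (k : Nat) (hk : k < m.length)
    (M : List (List String)) (hshp : pvShp M = pvShp m)
    (st : List (Nat × Nat) × List Nat × List Nat)
    (hmk : ∀ p ∈ st.1, p.1 < k ∧ p.2 < pvRowlen m 0 ∧ p.2 ∈ st.2.2)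
    (hrs : ∀ i ∈ st.2.1, i < k)
    (hM : ∀ i j, i < m.length → j < pvRowlen m i →
        pvGetA M i j = pvCell st (pvRowlen m 0) i j (pvGetA m i j)) :
    pvShp ((List.range (M.headD []).length).foldl
        (fun m2 j => if pvGetA m2 k j = "0" then
            cross_zeros_in_row (cross_zeros_in_column (pvSetA m2 k j "[0]") j k) k j
          else m2) M) = pvShp m ∧
    (∀ p ∈ (pvPass1Step st k (m.getD k []) (pvRowlen m 0)).1,
        p.1 < k + 1 ∧ p.2 < pvRowlen m 0 ∧ p.2 ∈ (pvPass1Step st k (m.getD k []) (pvRowlen m 0)).2.2) ∧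
    (∀ i ∈ (pvPass1Step st k (m.getD k []) (pvRowlen m 0)).2.1, i < k + 1) ∧
    (∀ i j, i < m.length → j < pvRowlen m i →
        pvGetA ((List.range (M.headD []).length).foldl
            (fun m2 j => if pvGetA m2 k j = "0" then
                cross_zeros_in_row (cross_zeros_in_column (pvSetA m2 k j "[0]") j k) k j
              else m2) M) i j =
          pvCell (pvPass1Step st k (m.getD k []) (pvRowlen m 0)) (pvRowlen m 0) i j (pvGetA m i j)) := by
  set w := pvRowlen m 0 with hwdef
  set st' := pvPass1Step st k (m.getD k []) w with hst'
  have hw : (M.headD []).length = w := by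
    rw [pvHeadD_eq_getD]; exact pvRowlen_of_shp hshp 0
  have hwk : w ≤ pvRowlen m k := by
    have hmem : m.getD k [] ∈ m := by
      rw [List.getD_eq_getElem m [] hk]; exact List.getElem_mem hk
    have := hpre _ hmem
    rwa [pvHeadD_eq_getD] at this
  have hknotm : ∀ j', (k, j') ∉ st.1 := by
    intro j' hj'
    exact absurd (hmk _ hj').1 (by simp)
  have hknotr : k ∉ st.2.1 := fun h => absurd (hrs k h) (lt_irrefl k)
  -- value of M on row k, and the fire condition
  have hMk : ∀ j, j < w → pvGetA M k j =
      (if pvGetA m k j = "0" ∧ j ∈ st.2.2 then "x" else pvGetA m k j) := by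
    intro j hj
    rw [hM k j hk (by omega), pvCellRowK st w k j _ hknotm hknotr hj]
  have hfireiff : ∀ j, j < w →
      (pvGetA M k j = "0" ↔ (pvGetA m k j = "0" ∧ j ∉ st.2.2)) := by
    intro j hj
    rw [hMk j hj]
    by_cases hv : pvGetA m k j = "0"
    · by_cases hcs : j ∈ st.2.2
      · rw [if_pos ⟨hv, hcs⟩]; constructor
        · intro h; exact absurd h (by decide)
        · rintro ⟨-, h⟩; exact absurd hcs h
      · rw [if_neg (by tauto)]; tauto
    · rw [if_neg (by tauto)]; constructor
      · intro h; exact absurd h hv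
      · rintro ⟨h, -⟩; exact absurd h hv
  rw [hw]
  rcases hfind : pvFindMark (m.getD k []) w st.2.2 with _ | j0
  · -- no markable zero in row k: the inner loop does nothing
    have hnone : ∀ j, j < w → ¬ (pvGetA m k j = "0" ∧ j ∉ st.2.2) := by
      intro j hj
      have := (List.find?_eq_none).1 hfind j (List.mem_range.2 hj)
      rw [pvFindP] at this; simpa using this
    have hfix : (List.range w).foldl
        (fun m2 j => if pvGetA m2 k j = "0" then
            cross_zeros_in_row (cross_zeros_in_column (pvSetA m2 k j "[0]") j k) k j
          else m2) M = M := by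
      apply pvFoldl_fix
      intro j hj
      rw [if_neg]
      rw [hfireiff j (List.mem_range.1 hj)]
      exact hnone j (List.mem_range.1 hj)
    have hst : st' = st := by rw [hst']; unfold pvPass1Step; rw [hfind]
    rw [hfix, hst]
    exact ⟨hshp, fun p hp => ⟨by have := (hmk p hp).1; omega, (hmk p hp).2⟩,
      fun i hi => by have := hrs i hi; omega, hM⟩
  · -- the first markable zero is at column j0
    obtain ⟨hp0, as, bs, hdec, has⟩ := (List.find?_eq_some_iff_append).1 hfind
    rw [pvFindP] at hp0
    have hj0w : j0 < w := by
      have : j0 ∈ List.range w := by rw [hdec]; exact List.mem_append_right _ (by simp)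
      exact List.mem_range.1 this
    have hj0cs : j0 ∉ st.2.2 := hp0.2
    have hv0 : pvGetA m k j0 = "0" := hp0.1
    have hst : st' = (st.1 ++ [(k, j0)], st.2.1 ++ [k], st.2.2 ++ [j0]) := by
      rw [hst']; unfold pvPass1Step; rw [hfind]
    have hnodup : (as ++ j0 :: bs).Nodup := by rw [← hdec]; exact List.nodup_range
    have hj0bs : j0 ∉ bs := by
      have := hnodup.of_append_right
      simp at this; exact this.1
    have hmemw : ∀ j, j ∈ as ∨ j ∈ bs → j < w := by
      intro j hj
      have : j ∈ List.range w := by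
        rw [hdec]
        rcases hj with h | h
        · exact List.mem_append_left _ h
        · exact List.mem_append_right _ (by simp [h])
      exact List.mem_range.1 this
    -- the loop is identity up to j0
    have hfix1 : as.foldl
        (fun m2 j => if pvGetA m2 k j = "0" then
            cross_zeros_in_row (cross_zeros_in_column (pvSetA m2 k j "[0]") j k) k j
          else m2) M = M := by
      apply pvFoldl_fix
      intro j hj
      rw [if_neg]
      rw [hfireiff j (hmemw j (Or.inl hj))]
      have := has j hj
      rw [Bool.not_eq_eq_eq_not, Bool.not_true] at this
      intro hc
      rw [← pvFindP m k j st.2.2] at hc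
      rw [hc] at this
      exact absurd this (by decide)
    -- the loop fires at j0
    have hfirej0 : pvGetA M k j0 = "0" := (hfireiff j0 hj0w).2 ⟨hv0, hj0cs⟩
    have hwi : ∀ i, i < m.length → w ≤ pvRowlen m i := by
      intro i hi
      have hmem : m.getD i [] ∈ m := by
        rw [List.getD_eq_getElem m [] hi]; exact List.getElem_mem hi
      have := hpre _ hmem
      rwa [pvHeadD_eq_getD] at this
    set M1 := pvSetA M k j0 "[0]" with hM1
    set X := cross_zeros_in_column M1 j0 k with hXdef
    set M2 := cross_zeros_in_row X k j0 with hM2def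
    have hshpM1 : pvShp M1 = pvShp m := by rw [hM1, pvShp_setA, hshp]
    have hshpX : pvShp X = pvShp m := by rw [hXdef, pvShp_crossCol, hshpM1]
    have hshpM2 : pvShp M2 = pvShp m := by rw [hM2def, pvShp_crossRow, hshpX]
    have hXw : (X.headD []).length = w := by
      rw [pvHeadD_eq_getD]; exact pvRowlen_of_shp hshpX 0
    have hGet1 : ∀ i j, pvGetA M1 i j = if k = i ∧ j0 = j then "[0]" else pvGetA M i j := by
      intro i j
      rw [hM1, pvGetA_setA]
      by_cases h : k = i ∧ j0 = j
      · rw [if_pos ⟨h.1, h.2, by rw [pvLen_of_shp hshp]; exact hk,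
          by rw [pvRowlen_of_shp hshp]; omega⟩, if_pos h]
      · rw [if_neg (by tauto), if_neg h]
    have hGetX : ∀ i j, pvGetA X i j =
        if j = j0 ∧ i ≠ k ∧ pvGetA M1 i j0 = "0" then "x" else pvGetA M1 i j := by
      intro i j; rw [hXdef, pvGetA_crossCol]
    have hGetM2 : ∀ i j, pvGetA M2 i j =
        if i = k ∧ j < w ∧ j ≠ j0 ∧ pvGetA X k j = "0" then "x" else pvGetA X i j := by
      intro i j; rw [hM2def, pvGetA_crossRow]; simp only [hXw]
    -- pointwise value of the matrix after processing row k
    have hpt : ∀ i j, i < m.length → j < pvRowlen m i →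
        pvGetA M2 i j =
          pvCell (st.1 ++ [(k, j0)], st.2.1 ++ [k], st.2.2 ++ [j0]) w i j (pvGetA m i j) := by
      intro i j hi hj
      by_cases hik : i = k
      · subst hik
        by_cases hjj : j = j0
        · subst hjj
          rw [hGetM2, if_neg (by tauto), hGetX, if_neg (by tauto), hGet1,
            if_pos ⟨rfl, rfl⟩]
          unfold pvCell
          rw [if_pos (by simp)]
        · by_cases hjw : j < w
          · have hXv : pvGetA X i j =
                if pvGetA m i j = "0" ∧ j ∈ st.2.2 then "x" else pvGetA m i j := by
              rw [hGetX, if_neg (by tauto), hGet1, if_neg (by tauto), hMk j hjw]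
            unfold pvCell
            rw [if_neg (by
              simp only [List.mem_append, List.mem_singleton, Prod.mk.injEq]
              push Not
              exact ⟨hknotm j, fun _ => hjj⟩)]
            by_cases hv : pvGetA m i j = "0"
            · rw [if_pos ⟨hv, hjw, Or.inl (List.mem_append_right _ (by simp))⟩]
              by_cases hcs : j ∈ st.2.2
              · rw [hGetM2, if_neg (by
                  rintro ⟨-, -, -, hz⟩
                  rw [hXv, if_pos ⟨hv, hcs⟩] at hz
                  exact absurd hz (by decide)), hXv, if_pos ⟨hv, hcs⟩]
              · rw [hGetM2, if_pos ⟨rfl, hjw, hjj, by rw [hXv, if_neg (by tauto)]; exact hv⟩]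
            · rw [if_neg (by tauto), hGetM2, if_neg (by
                rintro ⟨-, -, -, hz⟩
                rw [hXv, if_neg (by tauto)] at hz
                exact hv hz), hXv, if_neg (by tauto)]
          · have hjj0 : ¬ j0 = j := by omega
            rw [hGetM2, if_neg (by tauto), hGetX, if_neg (by
              rintro ⟨h1, -⟩; omega), hGet1, if_neg (by tauto),
              hM i j hi hj]
            unfold pvCell
            rw [if_neg (hknotm j), if_neg (by tauto),
              if_neg (by
                simp only [List.mem_append, List.mem_singleton, Prod.mk.injEq]
                push Not
                exact ⟨hknotm j, fun _ => hjj⟩), if_neg (by tauto)]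
      · -- i ≠ k
        by_cases hjj : j = j0
        · subst hjj
          have hMv : pvGetA M1 i j = pvGetA M i j := by
            rw [hGet1, if_neg (by tauto)]
          have himk : (i, j) ∉ st.1 := by
            intro hmem
            exact hj0cs ((hmk _ hmem).2.2)
          have hMij : pvGetA M i j =
              if pvGetA m i j = "0" ∧ i ∈ st.2.1 then "x" else pvGetA m i j := by
            rw [hM i j hi hj]
            unfold pvCell
            rw [if_neg himk]
            by_cases hv : pvGetA m i j = "0"
            · by_cases hir : i ∈ st.2.1
              · rw [if_pos ⟨hv, hj0w, Or.inl hir⟩, if_pos ⟨hv, hir⟩]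
              · rw [if_neg (by tauto), if_neg (by tauto)]
            · rw [if_neg (by tauto), if_neg (by tauto)]
          unfold pvCell
          rw [if_neg (by
            simp only [List.mem_append, List.mem_singleton, Prod.mk.injEq]
            push Not
            exact ⟨himk, fun hc => absurd hc hik⟩)]
          by_cases hv : pvGetA m i j = "0"
          · rw [if_pos ⟨hv, hj0w, Or.inr (List.mem_append_right _ (by simp))⟩]
            by_cases hir : i ∈ st.2.1
            · rw [hGetM2, if_neg (by tauto), hGetX, if_neg (by
                rintro ⟨-, -, hz⟩
                rw [hMv, hMij, if_pos ⟨hv, hir⟩] at hz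
                exact absurd hz (by decide)), hMv, hMij, if_pos ⟨hv, hir⟩]
            · rw [hGetM2, if_neg (by tauto), hGetX,
                if_pos ⟨rfl, hik, by rw [hMv, hMij, if_neg (by tauto)]; exact hv⟩]
          · rw [if_neg (by tauto), hGetM2, if_neg (by tauto), hGetX, if_neg (by
              rintro ⟨-, -, hz⟩
              rw [hMv, hMij, if_neg (by tauto)] at hz
              exact hv hz), hMv, hMij, if_neg (by tauto)]
        · rw [hGetM2, if_neg (by tauto), hGetX, if_neg (by
            rintro ⟨h1, -⟩; exact hjj h1), hGet1, if_neg (by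
            rintro ⟨h1, -⟩; exact hik h1.symm), hM i j hi hj]
          unfold pvCell
          simp only [List.mem_append, List.mem_singleton, Prod.mk.injEq]
          by_cases hm1 : (i, j) ∈ st.1
          · rw [if_pos hm1, if_pos (Or.inl hm1)]
          · have hrm : ¬ ((i, j) ∈ st.1 ∨ i = k ∧ j = j0) := by
              rintro (h | ⟨h1, -⟩)
              · exact hm1 h
              · exact hik h1
            rw [if_neg hm1]
            by_cases hc : pvGetA m i j = "0" ∧ j < w ∧ (i ∈ st.2.1 ∨ j ∈ st.2.2)
            · rw [if_pos hc, if_neg hrm, if_pos ⟨hc.1, hc.2.1, by tauto⟩]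
            · rw [if_neg hc, if_neg hrm, if_neg (by
                rintro ⟨h1, h2, (h | h) | (h | h)⟩
                · exact hc ⟨h1, h2, Or.inl h⟩
                · exact hik h
                · exact hc ⟨h1, h2, Or.inr h⟩
                · exact hjj h)]
    -- the loop is identity after j0
    have hfix2 : bs.foldl
        (fun m2 j => if pvGetA m2 k j = "0" then
            cross_zeros_in_row (cross_zeros_in_column (pvSetA m2 k j "[0]") j k) k j
          else m2) M2 = M2 := by
      apply pvFoldl_fix
      intro j hj
      have hjw := hmemw j (Or.inr hj)
      have hjj0 : j ≠ j0 := fun hc => hj0bs (hc ▸ hj)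
      rw [if_neg]
      rw [hpt k j hk (by have := hwi k hk; omega)]
      unfold pvCell
      by_cases hmem : (k, j) ∈ st.1 ++ [(k, j0)]
      · rw [if_pos hmem]; decide
      · rw [if_neg hmem]
        by_cases hv : pvGetA m k j = "0"
        · rw [if_pos ⟨hv, hjw, Or.inl (List.mem_append_right _ (by simp))⟩]; decide
        · rw [if_neg (by tauto)]; exact hv
    rw [hdec, List.foldl_append, hfix1, List.foldl_cons, if_pos hfirej0, hfix2, hst]
    refine ⟨hshpM2, ?_, ?_, hpt⟩
    · intro p hp
      rcases List.mem_append.1 hp with h | h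
      · obtain ⟨h1, h2, h3⟩ := hmk p h
        exact ⟨by omega, h2, List.mem_append_left _ h3⟩
      · simp at h
        subst h
        exact ⟨by omega, hj0w, List.mem_append_right _ (by simp)⟩
    · intro i hi
      rcases List.mem_append.1 hi with h | h
      · have := hrs i h; omega
      · simp at h; omega

-- two matrices with the same shape and the same in-range entries are equal
lemma pvMatExt {M M' : List (List String)} (h : pvShp M = pvShp M')
    (hpt : ∀ i j, i < M.length → j < pvRowlen M i → pvGetA M i j = pvGetA M' i j) : M = M' := by
  have hlen := pvLen_of_shp h
  apply List.ext_getElem hlen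
  intro i hi hi'
  apply List.ext_getElem
  · have := pvRowlen_of_shp h i
    unfold pvRowlen at this
    rwa [List.getD_eq_getElem M [] hi, List.getD_eq_getElem M' [] hi'] at this
  · intro j hj hj'
    have := hpt i j hi (by unfold pvRowlen; rw [List.getD_eq_getElem M [] hi]; exact hj)
    unfold pvGetA at this
    rwa [List.getD_eq_getElem M [] hi, List.getD_eq_getElem M' [] hi',
      List.getD_eq_getElem _ "" hj, List.getD_eq_getElem _ "" hj'] at this

-- the body of A's outer loop, named for the induction
def pvABody : List (List String) → Nat → List (List String) := fun M i =>
  (List.range (M.headD []).length).foldl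
    (fun m2 j => if pvGetA m2 i j = "0" then
        cross_zeros_in_row (cross_zeros_in_column (pvSetA m2 i j "[0]") j i) i j
      else m2) M

lemma pvMark_eq_fold (m : List (List String)) :
    mark_any_zero m = (List.range m.length).foldl pvABody m := rfl

-- A's outer loop up to row t, matched against B's pass-1 state pvSig
lemma pvOuter (m : List (List String)) (hpre : Pre_mark_any_zero m) :
    ∀ t, t ≤ m.length →
      pvShp ((List.range t).foldl pvABody m) = pvShp m ∧
      (∀ p ∈ (pvSig m (pvRowlen m 0) t).1,
          p.1 < t ∧ p.2 < pvRowlen m 0 ∧ p.2 ∈ (pvSig m (pvRowlen m 0) t).2.2) ∧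
      (∀ i ∈ (pvSig m (pvRowlen m 0) t).2.1, i < t) ∧
      (∀ i j, i < m.length → j < pvRowlen m i →
        pvGetA ((List.range t).foldl pvABody m) i j =
          pvCell (pvSig m (pvRowlen m 0) t) (pvRowlen m 0) i j (pvGetA m i j)) := by
  intro t
  induction t with
  | zero =>
      intro _
      refine ⟨rfl, by simp [pvSig], by simp [pvSig], ?_⟩
      intro i j hi hj
      simp [pvSig, pvCell]
  | succ t ih =>
      intro ht
      obtain ⟨hshp, hmk, hrs, hM⟩ := ih (by omega)
      rw [List.range_succ, List.foldl_append, List.foldl_cons, List.foldl_nil]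
      have := pvStep m hpre t (by omega) ((List.range t).foldl pvABody m) hshp
        (pvSig m (pvRowlen m 0) t) hmk hrs hM
      obtain ⟨h1, h2, h3, h4⟩ := this
      exact ⟨h1, by rw [pvSig]; exact h2, by rw [pvSig]; exact h3, by rw [pvSig]; exact h4⟩

lemma pvPass1_eq_sig (m : List (List String)) (w : Nat) :
    pvPass1 m w = pvSig m w m.length := by
  unfold pvPass1
  generalize m.length = t
  induction t with
  | zero => rfl
  | succ t ih =>
      rw [List.range_succ, List.foldl_append, List.foldl_cons, List.foldl_nil, ih, pvSig]

-- row-level set/get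
lemma pvRowSetGet (r : List String) (j : Nat) (v : String) (j' : Nat) :
    (r.set j v).getD j' "" = if j = j' ∧ j < r.length then v else r.getD j' "" := by
  rw [List.getD_eq_getElem?_getD, List.getD_eq_getElem?_getD, List.getElem?_set]
  by_cases hj : j = j'
  · subst hj
    by_cases hl : j < r.length
    · simp [hl]
    · rw [List.getElem?_eq_none (by omega)]
      simp [hl]
  · simp [hj]

lemma pvRowGet_inrange {r : List String} {j : Nat} (h : r.getD j "" = "0") : j < r.length := by
  by_contra hc
  rw [List.getD_eq_getElem?_getD, List.getElem?_eq_none (by omega)] at h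
  exact absurd h (by decide)

lemma pvRelabelLen (i : Nat) (st : List (Nat × Nat) × List Nat × List Nat)
    (row : List String) (t : Nat) :
    ((List.range t).foldl
      (fun r j => if st.1.contains (i, j) then r.set j "[0]"
        else if r.getD j "" == "0" && (st.2.1.contains i || st.2.2.contains j) then r.set j "x"
        else r) row).length = row.length := by
  induction t with
  | zero => rfl
  | succ t ih =>
      rw [List.range_succ, List.foldl_append, List.foldl_cons, List.foldl_nil]
      split
      · rw [List.length_set]; exact ih
      · split
        · rw [List.length_set]; exact ih
        · exact ih

lemma pvRelabelAux (i : Nat) (st : List (Nat × Nat) × List Nat × List Nat)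
    (row : List String) (t : Nat) : ∀ j,
    ((List.range t).foldl
      (fun r j => if st.1.contains (i, j) then r.set j "[0]"
        else if r.getD j "" == "0" && (st.2.1.contains i || st.2.2.contains j) then r.set j "x"
        else r) row).getD j "" =
      if j < t ∧ (i, j) ∈ st.1 ∧ j < row.length then "[0]"
      else if j < t ∧ (i, j) ∉ st.1 ∧ row.getD j "" = "0" ∧ (i ∈ st.2.1 ∨ j ∈ st.2.2) then "x"
      else row.getD j "" := by
  induction t with
  | zero => simp
  | succ t ih =>
      intro j
      rw [List.range_succ, List.foldl_append, List.foldl_cons, List.foldl_nil]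
      set rt := (List.range t).foldl
        (fun r j => if st.1.contains (i, j) then r.set j "[0]"
          else if r.getD j "" == "0" && (st.2.1.contains i || st.2.2.contains j) then r.set j "x"
          else r) row with hrt
      have hlen : rt.length = row.length := by rw [hrt]; exact pvRelabelLen i st row t
      have hgt : rt.getD t "" = row.getD t "" := by rw [hrt, ih]; simp
      by_cases hm : (i, t) ∈ st.1
      · rw [if_pos (by simpa using hm)]
        rw [pvRowSetGet, hlen]
        by_cases hjt : t = j ∧ t < row.length
        · obtain ⟨hjt1, hjt2⟩ := hjt
          subst hjt1
          rw [if_pos ⟨rfl, hjt2⟩, if_pos ⟨by omega, hm, hjt2⟩]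
        · rw [if_neg hjt, ih]
          by_cases h1 : j < t ∧ (i, j) ∈ st.1 ∧ j < row.length
          · rw [if_pos h1, if_pos ⟨by omega, h1.2⟩]
          · rw [if_neg h1]
            by_cases h2 : j < t ∧ (i, j) ∉ st.1 ∧ row.getD j "" = "0" ∧ (i ∈ st.2.1 ∨ j ∈ st.2.2)
            · rw [if_pos h2, if_neg (by
                rintro ⟨-, hc, -⟩
                exact h2.2.1 hc), if_pos ⟨by omega, h2.2⟩]
            · rw [if_neg h2, if_neg (by
                rintro ⟨ha, hb, hc⟩
                rcases Nat.lt_or_ge j t with h | h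
                · exact h1 ⟨h, hb, hc⟩
                · have : j = t := by omega
                  subst this
                  exact hjt ⟨rfl, hc⟩), if_neg (by
                rintro ⟨ha, hb, hc⟩
                rcases Nat.lt_or_ge j t with h | h
                · exact h2 ⟨h, hb, hc⟩
                · have : j = t := by omega
                  subst this
                  exact hb hm)]
      · rw [if_neg (by simpa using hm)]
        by_cases hf : row.getD t "" = "0" ∧ (i ∈ st.2.1 ∨ t ∈ st.2.2)
        · rw [if_pos (by
            rw [hgt]
            simpa using hf)]
          rw [pvRowSetGet, hlen]
          have htl : t < row.length := pvRowGet_inrange hf.1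
          by_cases hjt : t = j
          · subst hjt
            rw [if_pos ⟨rfl, htl⟩, if_neg (by
                rintro ⟨-, hc, -⟩
                exact hm hc), if_pos ⟨by omega, hm, hf⟩]
          · rw [if_neg (by tauto), ih]
            by_cases h1 : j < t ∧ (i, j) ∈ st.1 ∧ j < row.length
            · rw [if_pos h1, if_pos ⟨by omega, h1.2⟩]
            · rw [if_neg h1]
              by_cases h2 : j < t ∧ (i, j) ∉ st.1 ∧ row.getD j "" = "0" ∧ (i ∈ st.2.1 ∨ j ∈ st.2.2)
              · rw [if_pos h2, if_neg (by
                  rintro ⟨-, hc, -⟩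
                  exact h2.2.1 hc), if_pos ⟨by omega, h2.2⟩]
              · rw [if_neg h2, if_neg (by
                  rintro ⟨ha, hb, hc⟩
                  have : j < t := by omega
                  exact h1 ⟨this, hb, hc⟩), if_neg (by
                  rintro ⟨ha, hb, hc⟩
                  have : j < t := by omega
                  exact h2 ⟨this, hb, hc⟩)]
        · rw [if_neg (by
            rw [hgt]
            intro hc
            apply hf
            simpa using hc), ih]
          by_cases h1 : j < t ∧ (i, j) ∈ st.1 ∧ j < row.length
          · rw [if_pos h1, if_pos ⟨by omega, h1.2⟩]
          · rw [if_neg h1]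
            by_cases h2 : j < t ∧ (i, j) ∉ st.1 ∧ row.getD j "" = "0" ∧ (i ∈ st.2.1 ∨ j ∈ st.2.2)
            · rw [if_pos h2, if_neg (by
                rintro ⟨-, hc, -⟩
                exact h2.2.1 hc), if_pos ⟨by omega, h2.2⟩]
            · rw [if_neg h2, if_neg (by
                rintro ⟨ha, hb, hc⟩
                rcases Nat.lt_or_ge j t with h | h
                · exact h1 ⟨h, hb, hc⟩
                · have : j = t := by omega
                  subst this
                  exact hm hb), if_neg (by
                rintro ⟨ha, hb, hc⟩
                rcases Nat.lt_or_ge j t with h | h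
                · exact h2 ⟨h, hb, hc⟩
                · have : j = t := by omega
                  subst this
                  exact hf ⟨hc.1, hc.2⟩)]

lemma pvShpAlt (w : Nat) (st : List (Nat × Nat) × List Nat × List Nat)
    (m : List (List String)) :
    pvShp (m.mapIdx (fun i row => pvRelabelRow i row w st)) = pvShp m := by
  unfold pvShp
  apply List.ext_getElem (by simp)
  intro i hi hi'
  simp only [List.getElem_map, List.getElem_mapIdx]
  exact pvRelabelLen i st _ w

lemma pvMain (matrix : List (List String)) (hpre : Pre_mark_any_zero matrix) :
    mark_any_zero matrix = mark_any_zero_alt matrix := by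
  cases matrix with
  | nil => decide
  | cons hrow tl =>
      set m := hrow :: tl with hm
      set w := pvRowlen m 0 with hw
      set st := pvSig m w m.length with hstdef
      obtain ⟨hshpA, hmk, hrs, hA⟩ := pvOuter m hpre m.length (le_refl _)
      have hwi : ∀ i, i < m.length → w ≤ pvRowlen m i := by
        intro i hi
        have hmem : m.getD i [] ∈ m := by
          rw [List.getD_eq_getElem m [] hi]; exact List.getElem_mem hi
        have := hpre _ hmem
        rwa [pvHeadD_eq_getD] at this
      have hBeq : mark_any_zero_alt m =
          m.mapIdx (fun i row => pvRelabelRow i row w st) := by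
        rw [show mark_any_zero_alt m =
            m.mapIdx (fun i row => pvRelabelRow i row w (pvPass1 m w)) from rfl,
          pvPass1_eq_sig]
      have hshpB : pvShp (mark_any_zero_alt m) = pvShp m := by
        rw [hBeq]; exact pvShpAlt w st m
      rw [pvMark_eq_fold]
      apply pvMatExt (by rw [hshpA, hshpB])
      intro i j hi hj
      have hi' : i < m.length := by rwa [pvLen_of_shp hshpA] at hi
      have hj' : j < pvRowlen m i := by rwa [pvRowlen_of_shp hshpA] at hj
      rw [hA i j hi' hj']
      -- value of B at (i, j)
      have hrow : (mark_any_zero_alt m).getD i [] = pvRelabelRow i (m.getD i []) w st := by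
        rw [hBeq, List.getD_eq_getElem _ [] (by simpa using hi'), List.getElem_mapIdx,
          List.getD_eq_getElem m [] hi']
      have hB : pvGetA (mark_any_zero_alt m) i j =
          (pvRelabelRow i (m.getD i []) w st).getD j "" := by
        unfold pvGetA
        rw [hrow]
      rw [hB]
      have haux := pvRelabelAux i st (m.getD i []) w j
      rw [show pvRelabelRow i (m.getD i []) w st = (List.range w).foldl
          (fun r j => if st.1.contains (i, j) then r.set j "[0]"
            else if r.getD j "" == "0" && (st.2.1.contains i || st.2.2.contains j) then r.set j "x"
            else r) (m.getD i []) from rfl, haux]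
      have hv : (m.getD i []).getD j "" = pvGetA m i j := rfl
      have hrl : (m.getD i []).length = pvRowlen m i := rfl
      unfold pvCell
      by_cases hmem : (i, j) ∈ st.1
      · obtain ⟨-, hjw, -⟩ := hmk _ hmem
        rw [if_pos hmem, if_pos ⟨hjw, hmem, by rw [hrl]; omega⟩]
      · rw [if_neg hmem]
        by_cases hc : pvGetA m i j = "0" ∧ j < w ∧ (i ∈ st.2.1 ∨ j ∈ st.2.2)
        · rw [if_pos hc, if_neg (by
            rintro ⟨-, hcm, -⟩
            exact hmem hcm), if_pos ⟨hc.2.1, hmem, by rw [hv]; exact hc.1, hc.2.2⟩]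
        · rw [if_neg hc, if_neg (by
            rintro ⟨-, hcm, -⟩
            exact hmem hcm), if_neg (by
            rintro ⟨h1, -, h2, h3⟩
            rw [hv] at h2
            exact hc ⟨h2, h1, h3⟩), hv]

-- ===== VERDICT (by name: the statement is the Claim_ definition above) =====
theorem mark_any_zero_spec : Claim_equal_mark_any_zero := by
  unfold Claim_equal_mark_any_zero
  intro matrix _ hpre
  unfold Spec_mark_any_zero
  exact pvMain matrix hpre
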